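-- pv_equiv track=rewrite | github.com/chilldanil/ifcbook | ifc_book_prototype/geometry_backend.py | _classify_group
-- ===== SOURCE A (Python) =====
-- from typing import Dict, Iterable, List, Optional, Tuple
--
-- def _classify_group(class_name: str) -> Tuple[Optional[str], Optional[str]]:
--     tokens = class_name.split()
--     if not tokens:
--         return None, None
--     role = None
--     if "cut" in tokens:
--         role = "cut"
--     elif "projection" in tokens:
--         role = "projection"
--     if role is None:
--         return None, None
--     ifc_class = next((token for token in tokens if token.startswith("Ifc")), None)
--     return role, ifc_class
-- ===== SOURCE B (Python) =====
-- def _classify_group(class_name):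
--     has_cut = False
--     has_projection = False
--     ifc_class = None
--     for token in class_name.split():
--         if token == "cut":
--             has_cut = True
--         elif token == "projection":
--             has_projection = True
--         if ifc_class is None and token.startswith("Ifc"):
--             ifc_class = token
--     role = "cut" if has_cut else ("projection" if has_projection else None)
--     if role is None:
--         return None, None
--     return role, ifc_class
-- ===== Notes on version B (the rewrite author's own statement) =====
-- stated objective: alternative
-- what changed: Replaces the two membership scans plus a generator scan over the token list with a single pass that sets cut/projection flags and captures the first Ifc-prefixed token, resolving the role after the loop (which also subsumes the empty-token early return).
import Mathlib
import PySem

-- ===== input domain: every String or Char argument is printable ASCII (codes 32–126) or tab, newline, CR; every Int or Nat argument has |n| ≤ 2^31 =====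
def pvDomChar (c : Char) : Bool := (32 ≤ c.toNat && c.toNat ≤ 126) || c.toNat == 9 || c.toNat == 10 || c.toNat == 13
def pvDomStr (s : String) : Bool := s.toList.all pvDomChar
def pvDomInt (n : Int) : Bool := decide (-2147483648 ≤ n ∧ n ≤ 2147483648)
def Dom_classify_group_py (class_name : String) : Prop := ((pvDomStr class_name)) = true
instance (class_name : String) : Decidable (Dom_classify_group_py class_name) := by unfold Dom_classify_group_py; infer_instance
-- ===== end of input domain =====

-- B replaces A's two membership scans and generator scan over tokens with one flag-accumulating pass; same O(n) cost, different decomposition.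


-- ===== PORT A =====
def classify_group_py (class_name : String) : Option String × Option String :=
  let tokens := PySem.Str.split₀ class_name
  if tokens = [] then (none, none)
  else
    let role : Option String :=
      if tokens.contains "cut" then some "cut"
      else if tokens.contains "projection" then some "projection"
      else none
    match role with
    | none => (none, none)
    | some r =>
      let ifc_class := tokens.find? (fun t => PySem.Str.startswith t "Ifc")
      (some r, ifc_class)

-- ===== PORT B =====
def classify_group_py_alt_step (s : Bool × Bool × Option String) (token : String) :
    Bool × Bool × Option String :=
  let s1 :=
    if token = "cut" then (true, s.2.1, s.2.2)
    else if token = "projection" then (s.1, true, s.2.2)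
    else s
  if s1.2.2 = none ∧ PySem.Str.startswith token "Ifc" = true then (s1.1, s1.2.1, some token)
  else s1

def classify_group_py_alt (class_name : String) : Option String × Option String :=
  let st := (PySem.Str.split₀ class_name).foldl classify_group_py_alt_step (false, false, none)
  let role : Option String :=
    if st.1 then some "cut" else if st.2.1 then some "projection" else none
  match role with
  | none => (none, none)
  | some r => (some r, st.2.2)

-- ===== PRECONDITION & SPEC =====
def Spec_classify_group_py (class_name : String) (out : Option String × Option String) : Prop := out = classify_group_py_alt class_name
instance (class_name : String) (out : Option String × Option String) : Decidable (Spec_classify_group_py class_name out) := by unfold Spec_classify_group_py; infer_instance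

-- ===== CLAIM (what is proved, stated in full; the proofs are below) =====
def Claim_equal_classify_group_py : Prop := ∀ (class_name : String), Dom_classify_group_py class_name → Spec_classify_group_py class_name (classify_group_py class_name)

-- ===== LEMMAS AND PROOFS =====
theorem classify_group_py_foldl (ts : List String) (a b : Bool) (o : Option String) :
    ts.foldl classify_group_py_alt_step (a, b, o) =
      (a || ts.contains "cut", b || ts.contains "projection",
        o.or (ts.find? (fun t => PySem.Str.startswith t "Ifc"))) := by
  induction ts generalizing a b o with
  | nil => simp
  | cons h t ih =>
    have hcut : PySem.Chars.startswith ['c', 'u', 't'] ['I', 'f', 'c'] = false := by decide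
    have hproj : PySem.Chars.startswith ['p', 'r', 'o', 'j', 'e', 'c', 't', 'i', 'o', 'n'] ['I', 'f', 'c'] = false := by decide
    simp only [List.foldl_cons]
    by_cases hc : h = "cut"
    · subst hc
      simp [classify_group_py_alt_step, hcut, ih, Bool.or_assoc]
    · by_cases hp : h = "projection"
      · subst hp
        simp [classify_group_py_alt_step, hproj, ih]
      · have hc' : ¬("cut" = h) := fun e => hc e.symm
        have hp' : ¬("projection" = h) := fun e => hp e.symm
        cases o with
        | some v =>
          simp [classify_group_py_alt_step, hc, hp, hc', hp', ih]
        | none =>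
          by_cases hs : PySem.Chars.startswith h.toList ['I', 'f', 'c'] = true
          · simp [classify_group_py_alt_step, hc, hp, hc', hp', hs, ih]
          · simp [classify_group_py_alt_step, hc, hp, hc', hp', hs, ih]

theorem classify_group_eq (class_name : String) :
    classify_group_py_alt class_name = classify_group_py class_name := by
  unfold classify_group_py classify_group_py_alt
  rw [classify_group_py_foldl]
  cases hts : PySem.Str.split₀ class_name with
  | nil => simp
  | cons h t =>
    simp only [Bool.false_or, Option.none_or, if_neg (List.cons_ne_nil h t)]

-- ===== VERDICT (by name: the statement is the Claim_ definition above) =====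
theorem classify_group_py_spec : Claim_equal_classify_group_py := by
  intro s _
  unfold Spec_classify_group_py
  exact (classify_group_eq s).symm
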